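-- pv_equiv track=rewrite | github.com/paiml/depyler | examples/hard_coin_change.py | max_reachable
-- ===== SOURCE A (Python) =====
-- def max_reachable(coins: list[int], amount: int) -> int:
--     """Find the largest amount <= given amount that can be made."""
--     dp: list[bool] = [False] * (amount + 1)
--     dp[0] = True
--     i: int = 0
--     while i < len(coins):
--         j: int = coins[i]
--         while j <= amount:
--             if dp[j - coins[i]]:
--                 dp[j] = True
--             j = j + 1
--         i = i + 1
--     best: int = 0
--     k: int = amount
--     while k >= 0:
--         if dp[k]:
--             best = k
--             k = -1
--         else:
--             k = k - 1
--     return best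
-- ===== SOURCE B (Python) =====
-- def max_reachable(coins: list[int], amount: int) -> int:
--     """Find the largest amount <= given amount that can be made."""
--     reach = {0}
--     for c in coins:
--         if c > 0:
--             reach = {s + m * c for s in reach for m in range((amount - s) // c + 1)}
--     return max(reach)
-- ===== Notes on version B (the rewrite author's own statement) =====
-- stated objective: alternative
-- what changed: Replaces A's boolean DP array with ascending index sweeps per coin and a final downward scan by a set of reachable sums, extended per coin with all bounded multiples via a comprehension, returning max(reach).
import Mathlib
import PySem

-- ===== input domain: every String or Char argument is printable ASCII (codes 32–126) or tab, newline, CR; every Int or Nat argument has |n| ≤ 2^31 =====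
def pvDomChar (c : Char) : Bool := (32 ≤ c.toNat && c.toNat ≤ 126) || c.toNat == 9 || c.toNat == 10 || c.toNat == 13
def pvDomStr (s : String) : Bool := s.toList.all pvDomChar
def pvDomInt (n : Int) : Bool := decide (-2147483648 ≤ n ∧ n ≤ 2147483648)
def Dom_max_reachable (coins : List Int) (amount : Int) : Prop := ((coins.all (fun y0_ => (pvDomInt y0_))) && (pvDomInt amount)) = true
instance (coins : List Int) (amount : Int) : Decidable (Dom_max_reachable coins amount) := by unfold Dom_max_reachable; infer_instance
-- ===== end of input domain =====

-- B replaces A's boolean-array DP sweeps by a set of reachable sums extended coin-by-coin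
-- with all bounded multiples, then takes its max (objective: alternative decomposition).

-- ===== PORT A =====
-- inner 'while j <= amount' loop: j ascends, dp[j] is set when dp[j - c] holds
-- (dp reads/writes use the total forms pyGetD/pySetD; under Pre_ every index is in range,
--  exactly where the Python indexing returns instead of raising)
def pvSweep (amount c j : Int) (dp : List Bool) : List Bool :=
  if _h : j ≤ amount then
    pvSweep amount c (j + 1)
      (if PySem.List.pyGetD dp (j - c) false then PySem.List.pySetD dp j true else dp)
  else dp
termination_by (amount + 1 - j).toNat
decreasing_by simp; omega


-- final 'while k >= 0' loop: scan downward, best := first k with dp[k] (else 0)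
def pvFindBest (dp : List Bool) (k : Int) : Int :=
  if _h : 0 ≤ k then
    if PySem.List.pyGetD dp k false then k else pvFindBest dp (k - 1)
  else 0
termination_by (k + 1).toNat
decreasing_by simp; omega


def max_reachable (coins : List Int) (amount : Int) : Int :=
  -- dp = [False] * (amount + 1); dp[0] = True
  -- while i < len(coins): sweep with coins[i], starting at j = coins[i]
  pvFindBest
    (coins.foldl (fun dp c => pvSweep amount c c dp)
      (PySem.List.pySetD (List.replicate (amount + 1).toNat false) 0 true))
    amount

-- ===== PORT B =====
-- one coin step: reach = {s + m * c  for s in reach  for m in range((amount - s) // c + 1)}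
def pvStep (amount : Int) (r : PySem.Set Int) (c : Int) : PySem.Set Int :=
  if c > 0 then
    PySem.Set.ofList (r.flatMap (fun s =>
      (PySem.List.pyRange 0 (PySem.Int.floordiv (amount - s) c + 1) 1).map (fun m => s + m * c)))
  else r

def max_reachable_alt (coins : List Int) (amount : Int) : Int :=
  -- reach = {0}; for c in coins: …; return max(reach)
  -- ('.getD 0' is the total form of max(); under Pre_ the set contains 0, so it is never empty)
  (PySem.List.max? (coins.foldl (pvStep amount) (PySem.Set.ofList [0])) (fun x => x)).getD 0

-- ===== PRECONDITION & SPEC =====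
-- Pre_ excludes amount < 0 (A's 'dp[0] = True' hits an empty list: IndexError) and negative
-- coins (A's inner loop reads dp[j - c] past the end: IndexError); A raises on exactly those.
def Pre_max_reachable (coins : List Int) (amount : Int) : Prop :=
  0 ≤ amount ∧ ∀ c ∈ coins, 0 ≤ c
instance (coins : List Int) (amount : Int) : Decidable (Pre_max_reachable coins amount) := by
  unfold Pre_max_reachable; infer_instance

def pvWitness_max_reachable : List Int × Int := ([1, 3], 7)

def Spec_max_reachable (coins : List Int) (amount : Int) (out : Int) : Prop :=
  out = max_reachable_alt coins amount
instance (coins : List Int) (amount : Int) (out : Int) : Decidable (Spec_max_reachable coins amount out) := by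
  unfold Spec_max_reachable; infer_instance

-- ===== CLAIM (what is proved, stated in full; the proofs are below) =====
def Claim_equal_max_reachable : Prop := ∀ (coins : List Int) (amount : Int), Dom_max_reachable coins amount → Pre_max_reachable coins amount → Spec_max_reachable coins amount (max_reachable coins amount)

-- ===== LEMMAS AND PROOFS =====

-- under Pre_, every pySetD in A is in range, where it is plain List.set
lemma pvSetD_eq_set (xs : List Bool) (i : Int) (v : Bool) (h0 : 0 ≤ i)
    (h1 : i.toNat < xs.length) : PySem.List.pySetD xs i v = xs.set i.toNat v := by
  unfold PySem.List.pySetD PySem.List.pySet? PySem.List.pyIdx?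
  split_ifs <;> simp_all

lemma pvGetD_pySetD (xs : List Bool) (i k : Int) (v : Bool) (h0 : 0 ≤ i)
    (h1 : i.toNat < xs.length) (hk : 0 ≤ k) :
    PySem.List.pyGetD (PySem.List.pySetD xs i v) k false
      = if k = i then v else PySem.List.pyGetD xs k false := by
  rw [pvSetD_eq_set xs i v h0 h1, PySem.List.pyGetD_of_nonneg _ _ hk,
    PySem.List.pyGetD_of_nonneg _ _ hk]
  rw [List.getD_eq_getElem?_getD, List.getD_eq_getElem?_getD, List.getElem?_set]
  have : k = i ↔ i.toNat = k.toNat := by omega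
  split_ifs with h2 h3 h4 <;> simp_all

-- "k is (orig dp)-reachable using extra copies of coin c"
def pvF (c : Int) (dp : List Bool) (k : Int) : Prop :=
  ∃ m : Int, 0 ≤ m ∧ 0 ≤ k - m * c ∧ PySem.List.pyGetD dp (k - m * c) false = true

-- dp's true indices in [0, amount] are exactly the set S
def pvGood (amount : Int) (dp : List Bool) (S : List Int) : Prop :=
  dp.length = (amount + 1).toNat ∧ (0 : Int) ∈ S ∧
  ∀ k : Int, (0 ≤ k ∧ k ≤ amount ∧ PySem.List.pyGetD dp k false = true) ↔ k ∈ S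

lemma pvSweep_spec (amount c : Int) (hc : 0 ≤ c) (dp₀ : List Bool)
    (hlen₀ : dp₀.length = (amount + 1).toNat) :
    ∀ j dp, c ≤ j → dp.length = dp₀.length →
    (∀ k : Int, 0 ≤ k → k ≤ amount →
      (PySem.List.pyGetD dp k false = true ↔
        (k < j ∧ pvF c dp₀ k) ∨ PySem.List.pyGetD dp₀ k false = true)) →
    (pvSweep amount c j dp).length = dp₀.length ∧
    ∀ k : Int, 0 ≤ k → k ≤ amount →
      (PySem.List.pyGetD (pvSweep amount c j dp) k false = true ↔
        pvF c dp₀ k ∨ PySem.List.pyGetD dp₀ k false = true) := by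
  intro j dp
  generalize hfuel : (amount + 1 - j).toNat = n
  induction n using Nat.strong_induction_on generalizing j dp with
  | _ n ih =>
    intro hcj hlen hinv
    rw [pvSweep]
    by_cases hj : j ≤ amount
    · rw [dif_pos hj]
      have hj0 : 0 ≤ j := le_trans hc hcj
      have hjr : j.toNat < dp.length := by rw [hlen, hlen₀]; omega
      have hcarry : PySem.List.pyGetD dp j false = true →
          PySem.List.pyGetD
            (if PySem.List.pyGetD dp (j - c) false = true then PySem.List.pySetD dp j true else dp)
            j false = true := by
        intro h
        split_ifs with hb
        · rw [pvGetD_pySetD dp j j true hj0 hjr hj0]; simp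
        · exact h
      have hlen' : (if PySem.List.pyGetD dp (j - c) false = true
            then PySem.List.pySetD dp j true else dp).length = dp₀.length := by
        split_ifs
        · rw [PySem.List.length_pySetD]; exact hlen
        · exact hlen
      have hinv' : ∀ k : Int, 0 ≤ k → k ≤ amount →
          (PySem.List.pyGetD
              (if PySem.List.pyGetD dp (j - c) false = true then PySem.List.pySetD dp j true else dp)
              k false = true ↔
            (k < j + 1 ∧ pvF c dp₀ k) ∨ PySem.List.pyGetD dp₀ k false = true) := by
        intro k hk0 hkA
        by_cases hkj : k = j
        · subst hkj
          have hjc := hinv (k - c) (by omega) (by omega)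
          have hjj := hinv k hk0 hkA
          constructor
          · intro h'
            by_cases hb : PySem.List.pyGetD dp (k - c) false = true
            · left
              refine ⟨by omega, ?_⟩
              rcases hjc.mp hb with ⟨_, m, hm0, hmk, hmd⟩ | hd0
              · exact ⟨m + 1, by omega, by nlinarith [hmk],
                  by have : k - (m + 1) * c = k - c - m * c := by ring
                     rw [this]; exact hmd⟩
              · exact ⟨1, by omega, by omega, by simpa using hd0⟩
            · rw [if_neg (by simp [hb])] at h'
              rcases hjj.mp h' with ⟨hlt, _⟩ | hd
              · omega
              · exact Or.inr hd
          · intro h'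
            have hdp_of : PySem.List.pyGetD dp₀ k false = true →
                PySem.List.pyGetD dp k false = true := fun hd =>
              hjj.mpr (Or.inr hd)
            rcases h' with ⟨_, m, hm0, hmk, hmd⟩ | hd
            · by_cases hm : m = 0
              · subst hm
                simp only [zero_mul, sub_zero] at hmd
                exact hcarry (hdp_of hmd)
              · by_cases hc0 : c = 0
                · subst hc0
                  simp only [mul_zero, sub_zero] at hmd
                  exact hcarry (hdp_of hmd)
                · have hcpos : 0 < c := by omega
                  have hb : PySem.List.pyGetD dp (k - c) false = true := by
                    apply hjc.mpr
                    left
                    refine ⟨by omega, m - 1, by omega, ?_, ?_⟩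
                    · have : k - c - (m - 1) * c = k - m * c := by ring
                      rw [this]; omega
                    · have : k - c - (m - 1) * c = k - m * c := by ring
                      rw [this]; exact hmd
                  rw [if_pos hb, pvGetD_pySetD dp k k true hj0 hjr hk0]
                  simp
            · exact hcarry (hdp_of hd)
        · have hval : PySem.List.pyGetD
              (if PySem.List.pyGetD dp (j - c) false = true then PySem.List.pySetD dp j true else dp)
              k false = PySem.List.pyGetD dp k false := by
            split_ifs with hb
            · rw [pvGetD_pySetD dp j k true hj0 hjr hk0, if_neg hkj]
            · rfl
          rw [hval, hinv k hk0 hkA]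
          constructor
          · rintro (⟨hlt, hF⟩ | hd)
            · exact Or.inl ⟨by omega, hF⟩
            · exact Or.inr hd
          · rintro (⟨hlt, hF⟩ | hd)
            · exact Or.inl ⟨by omega, hF⟩
            · exact Or.inr hd
      exact ih (amount + 1 - (j + 1)).toNat (by omega) (j + 1) _ rfl (by omega) hlen' hinv'
    · rw [dif_neg hj]
      refine ⟨hlen, fun k hk0 hkA => ?_⟩
      rw [hinv k hk0 hkA]
      constructor
      · rintro (⟨_, hF⟩ | hd)
        · exact Or.inl hF
        · exact Or.inr hd
      · rintro (hF | hd)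
        · exact Or.inl ⟨by omega, hF⟩
        · exact Or.inr hd

lemma pvStep_mem (amount c : Int) (hc : 0 < c) (S : List Int) (k : Int) :
    k ∈ pvStep amount S c ↔ ∃ m : Int, 0 ≤ m ∧ k - m * c ∈ S ∧ k ≤ amount := by
  simp only [pvStep, if_pos hc, PySem.Set.mem_ofList, List.mem_flatMap, List.mem_map,
    PySem.List.mem_pyRange_one]
  constructor
  · rintro ⟨s, hs, m, ⟨hm0, hmlt⟩, rfl⟩
    have hle : m * c ≤ amount - s := (PySem.Int.le_floordiv_iff_mul_le hc).mp (by omega)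
    exact ⟨m, hm0, by simpa using hs, by linarith⟩
  · rintro ⟨m, hm0, hmem, hk⟩
    refine ⟨k - m * c, hmem, m, ⟨hm0, ?_⟩, by ring⟩
    have : m * c ≤ amount - (k - m * c) := by linarith
    have := (PySem.Int.le_floordiv_iff_mul_le hc).mpr this
    omega

lemma pvStep_good (amount : Int) (hA : 0 ≤ amount) (c : Int) (hc : 0 ≤ c)
    (dp : List Bool) (S : List Int) (hg : pvGood amount dp S) :
    pvGood amount (pvSweep amount c c dp) (pvStep amount S c) := by
  obtain ⟨hlen, h0S, hiff⟩ := hg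
  by_cases hcpos : 0 < c
  · have hinv0 : ∀ k : Int, 0 ≤ k → k ≤ amount →
        (PySem.List.pyGetD dp k false = true ↔
          (k < c ∧ pvF c dp k) ∨ PySem.List.pyGetD dp k false = true) := by
      intro k hk0 hkA
      constructor
      · exact Or.inr
      · rintro (⟨hlt, m, hm0, hmk, hmd⟩ | hd)
        · by_cases hm : m = 0
          · subst hm; simpa using hmd
          · have hcm : c * 1 ≤ c * m := by
              apply mul_le_mul_of_nonneg_left (by omega) (le_of_lt hcpos)
            nlinarith
        · exact hd
    obtain ⟨hlen', hfin⟩ := pvSweep_spec amount c hc dp hlen c dp le_rfl rfl hinv0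
    refine ⟨by rw [hlen']; exact hlen, ?_, fun k => ?_⟩
    · rw [pvStep_mem amount c hcpos]
      exact ⟨0, le_rfl, by simpa using h0S, hA⟩
    · rw [pvStep_mem amount c hcpos]
      constructor
      · rintro ⟨hk0, hkA, hget⟩
        rcases (hfin k hk0 hkA).mp hget with ⟨m, hm0, hmk, hmd⟩ | hd
        · have hmc : 0 ≤ m * c := mul_nonneg hm0 (le_of_lt hcpos)
          exact ⟨m, hm0, (hiff (k - m * c)).mp ⟨hmk, by linarith, hmd⟩, hkA⟩
        · exact ⟨0, le_rfl, by simpa using (hiff k).mp ⟨hk0, hkA, hd⟩, hkA⟩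
      · rintro ⟨m, hm0, hmem, hkA⟩
        obtain ⟨hs0, hsA, hsd⟩ := (hiff (k - m * c)).mpr hmem
        have hmc : 0 ≤ m * c := mul_nonneg hm0 (le_of_lt hcpos)
        refine ⟨by linarith, hkA, ?_⟩
        exact (hfin k (by linarith) hkA).mpr (Or.inl ⟨m, hm0, hs0, hsd⟩)
  · have hc0 : c = 0 := by omega
    subst hc0
    have hinv0 : ∀ k : Int, 0 ≤ k → k ≤ amount →
        (PySem.List.pyGetD dp k false = true ↔
          (k < 0 ∧ pvF 0 dp k) ∨ PySem.List.pyGetD dp k false = true) := by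
      intro k hk0 hkA
      constructor
      · exact Or.inr
      · rintro (⟨hlt, _⟩ | hd)
        · omega
        · exact hd
    obtain ⟨hlen', hfin⟩ := pvSweep_spec amount 0 le_rfl dp hlen 0 dp le_rfl rfl hinv0
    have hstep : pvStep amount S 0 = S := by simp [pvStep]
    rw [hstep]
    refine ⟨by rw [hlen']; exact hlen, h0S, fun k => ?_⟩
    rw [← hiff k]
    constructor
    · rintro ⟨hk0, hkA, hget⟩
      rcases (hfin k hk0 hkA).mp hget with ⟨m, hm0, hmk, hmd⟩ | hd
      · simp only [mul_zero, sub_zero] at hmd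
        exact ⟨hk0, hkA, hmd⟩
      · exact ⟨hk0, hkA, hd⟩
    · rintro ⟨hk0, hkA, hget⟩
      exact ⟨hk0, hkA, (hfin k hk0 hkA).mpr (Or.inr hget)⟩

lemma pvFold_good (amount : Int) (hA : 0 ≤ amount) :
    ∀ (coins : List Int), (∀ c ∈ coins, 0 ≤ c) → ∀ dp S, pvGood amount dp S →
    pvGood amount (coins.foldl (fun dp c => pvSweep amount c c dp) dp)
      (coins.foldl (pvStep amount) S) := by
  intro coins
  induction coins with
  | nil => intro _ dp S hg; simpa using hg
  | cons c cs ih =>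
    intro hcs dp S hg
    simp only [List.foldl_cons]
    exact ih (fun x hx => hcs x (List.mem_cons_of_mem c hx))
      _ _ (pvStep_good amount hA c (hcs c (List.mem_cons_self)) dp S hg)

lemma pvInit_good (amount : Int) (hA : 0 ≤ amount) :
    pvGood amount (PySem.List.pySetD (List.replicate (amount + 1).toNat false) 0 true) (PySem.Set.ofList [0]) := by
  have hlen : (PySem.List.pySetD (List.replicate (amount + 1).toNat false) 0 true).length
      = (amount + 1).toNat := by
    rw [PySem.List.length_pySetD, List.length_replicate]
  have hrange : (0 : Int).toNat < (List.replicate (amount + 1).toNat false).length := by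
    simp; omega
  refine ⟨hlen, by simp [PySem.Set.mem_ofList], fun k => ?_⟩
  constructor
  · rintro ⟨hk0, hkA, hget⟩
    rw [pvGetD_pySetD _ _ _ _ le_rfl hrange hk0] at hget
    by_cases h : k = 0
    · simp [h, PySem.Set.mem_ofList]
    · rw [if_neg h, PySem.List.pyGetD_of_nonneg _ _ hk0] at hget
      rw [List.getD_eq_getElem?_getD, List.getElem?_replicate] at hget
      split_ifs at hget <;> simp_all
  · intro hk
    have hk0 : k = 0 := by simpa [PySem.Set.mem_ofList] using hk
    subst hk0
    exact ⟨le_rfl, hA, by rw [pvGetD_pySetD _ _ _ _ le_rfl hrange le_rfl]; simp⟩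

lemma pvFindBest_spec (amount : Int) (dp : List Bool) (S : List Int)
    (hiff : ∀ k : Int, (0 ≤ k ∧ k ≤ amount ∧ PySem.List.pyGetD dp k false = true) ↔ k ∈ S)
    (h0 : (0 : Int) ∈ S) :
    ∀ k : Int, 0 ≤ k → k ≤ amount → (∀ s ∈ S, s ≤ k) →
      pvFindBest dp k ∈ S ∧ ∀ s ∈ S, s ≤ pvFindBest dp k := by
  have H : ∀ n : Nat, ∀ k : Int, k.toNat = n → 0 ≤ k → k ≤ amount → (∀ s ∈ S, s ≤ k) →
      pvFindBest dp k ∈ S ∧ ∀ s ∈ S, s ≤ pvFindBest dp k := by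
    intro n
    induction n using Nat.strong_induction_on with
    | _ n ih =>
      intro k hkn hk0 hkA hub
      rw [pvFindBest, dif_pos hk0]
      by_cases hget : PySem.List.pyGetD dp k false = true
      · simp only [hget, if_true]
        exact ⟨(hiff k).mp ⟨hk0, hkA, hget⟩, hub⟩
      · have hkS : k ∉ S := fun h => hget ((hiff k).mpr h).2.2
        have hkne : k ≠ 0 := by
          rintro rfl; exact hget ((hiff 0).mpr h0).2.2
        simp only [hget, if_false, Bool.false_eq_true]
        have hub' : ∀ s ∈ S, s ≤ k - 1 := by
          intro s hs
          have h1 := hub s hs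
          have h2 : s ≠ k := fun e => hkS (e ▸ hs)
          omega
        exact ih (k - 1).toNat (by omega) (k - 1) rfl (by omega) (by omega) hub'
  exact fun k hk0 hkA hub => H k.toNat k rfl hk0 hkA hub

-- ===== VERDICT (by name: the statement is the Claim_ definition above) =====
theorem max_reachable_spec : Claim_equal_max_reachable := by
  intro coins amount _hdom hpre
  obtain ⟨hA, hcs⟩ := hpre
  unfold Spec_max_reachable max_reachable max_reachable_alt
  have hg := pvFold_good amount hA coins hcs _ _ (pvInit_good amount hA)
  obtain ⟨hlen, h0S, hiff⟩ := hg
  have hub : ∀ s ∈ (coins.foldl (pvStep amount) (PySem.Set.ofList [0])), s ≤ amount := by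
    intro s hs
    have := (hiff s).mpr (by simpa using hs)
    exact this.2.1
  have hfb := pvFindBest_spec amount _ _ hiff h0S amount hA le_rfl (by simpa using hub)
  have hne : (coins.foldl (pvStep amount) (PySem.Set.ofList [0])) ≠ [] := by
    intro h; rw [h] at h0S; exact (List.not_mem_nil) h0S
  obtain ⟨m, hm⟩ : ∃ m, PySem.List.max? (coins.foldl (pvStep amount) (PySem.Set.ofList [0]))
      (fun x => x) = some m := by
    cases hmx : PySem.List.max? (coins.foldl (pvStep amount) (PySem.Set.ofList [0]))
        (fun x => x) with
    | none => exact absurd ((PySem.List.max?_eq_none_iff _ _).mp hmx) hne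
    | some m => exact ⟨m, rfl⟩
  rw [hm]
  have hmmem := PySem.List.max?_mem hm
  have hmmax := PySem.List.max?_isMax hm
  have h1 : pvFindBest (coins.foldl (fun dp c => pvSweep amount c c dp)
      (PySem.List.pySetD (List.replicate (amount + 1).toNat false) 0 true)) amount ≤ m :=
    hmmax _ hfb.1
  have h2 : m ≤ pvFindBest (coins.foldl (fun dp c => pvSweep amount c c dp)
      (PySem.List.pySetD (List.replicate (amount + 1).toNat false) 0 true)) amount :=
    hfb.2 m hmmem
  simp
  omega
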